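-- pv_equiv track=rewrite | github.com/MiriamNM/Eight-queens-puzzle-python | src/domain/repositories/eight_queens_repository.py | build_board
-- ===== SOURCE A (Python) =====
-- from typing import List
--
-- def build_board(arr: List[List[int]], n: int) -> List[str]:
--     """
--     Construye una representación visual del tablero con las reinas.
--     """
--     board = []
--     for i in range(n):
--         row = ""
--         for j in range(n):
--             row += "|♔|" if [i, j] in arr else "|_|"
--         board.append(row)
--     return board
-- ===== SOURCE B (Python) =====
-- from typing import List
--
-- def build_board(arr: List[List[int]], n: int) -> List[str]:
--     """
--     Construye una representación visual del tablero con las reinas.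
--     Scatter approach: start from an all-blank grid and place each queen once.
--     """
--     board = [["|_|"] * n for _ in range(n)]
--     for cell in arr:
--         if len(cell) == 2 and 0 <= cell[0] < n and 0 <= cell[1] < n:
--             board[cell[0]][cell[1]] = "|♔|"
--     return ["".join(row) for row in board]
-- ===== Notes on version B (the rewrite author's own statement) =====
-- stated objective: alternative
-- what changed: Instead of testing '[i,j] in arr' at every one of the n*n cells (a linear scan of arr per cell), B allocates an all-blank n x n grid once, makes a single pass over arr writing each in-range queen into its cell, and joins each row.
import Mathlib
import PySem

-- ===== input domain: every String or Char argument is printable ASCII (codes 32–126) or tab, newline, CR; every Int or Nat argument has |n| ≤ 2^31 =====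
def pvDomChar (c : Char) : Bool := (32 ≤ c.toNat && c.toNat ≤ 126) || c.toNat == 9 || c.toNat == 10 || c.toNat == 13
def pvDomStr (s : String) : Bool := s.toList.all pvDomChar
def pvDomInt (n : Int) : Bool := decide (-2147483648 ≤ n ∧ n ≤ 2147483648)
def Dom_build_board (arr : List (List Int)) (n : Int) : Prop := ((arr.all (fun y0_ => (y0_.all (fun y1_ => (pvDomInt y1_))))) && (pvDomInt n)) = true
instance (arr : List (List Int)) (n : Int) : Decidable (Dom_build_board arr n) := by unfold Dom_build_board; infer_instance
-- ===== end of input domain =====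

-- B replaces the per-cell membership scan of arr by one blank-grid allocation and a single
-- placing pass over arr (a different algorithm; intended as fewer membership scans, measured
-- faster on mid sizes but unconfirmed at the largest timing size).

-- ===== PORT A =====
def build_board (arr : List (List Int)) (n : Int) : List String :=
  (PySem.List.pyRange 0 n 1).foldl
    (fun board i =>
      board ++ [ (PySem.List.pyRange 0 n 1).foldl
          (fun row j => row ++ (if [i, j] ∈ arr then "|♔|" else "|_|")) "" ])
    []

-- ===== PORT B =====
-- one queen-placement step: 'if len(cell) == 2 and 0 <= cell[0] < n and 0 <= cell[1] < n: board[cell[0]][cell[1]] = "|♔|"'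
def bbStep (n : Int) (g : List (List String)) (cell : List Int) : List (List String) :=
  match cell with
  | [i, j] =>
      if 0 ≤ i ∧ i < n ∧ 0 ≤ j ∧ j < n then
        g.modify i.toNat (fun row => row.set j.toNat "|♔|")
      else g
  | _ => g

def build_board_alt (arr : List (List Int)) (n : Int) : List String :=
  let blank := List.replicate n.toNat (List.replicate n.toNat "|_|")
  let grid := arr.foldl (bbStep n) blank
  grid.map (fun row => PySem.Str.join "" row)

-- ===== PRECONDITION & SPEC =====
def Spec_build_board (arr : List (List Int)) (n : Int) (out : List String) : Prop := out = build_board_alt arr n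
instance (arr : List (List Int)) (n : Int) (out : List String) : Decidable (Spec_build_board arr n out) := by unfold Spec_build_board; infer_instance

-- ===== CLAIM (what is proved, stated in full; the proofs are below) =====
def Claim_equal_build_board : Prop := ∀ (arr : List (List Int)) (n : Int), Dom_build_board arr n → Spec_build_board arr n (build_board arr n)

-- ===== LEMMAS AND PROOFS =====

-- cell access used only by the proofs
def pvCell (g : List (List String)) (i j : Nat) : String := ((g[i]?.getD [])[j]?).getD ""

theorem pvJoin_nil : PySem.Str.join "" [] = "" := by
  rw [← String.toList_inj]; simp [PySem.Str.toList_join, PySem.Chars.join_nil]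

theorem pvJoin_cons (y : String) (ys : List String) :
    PySem.Str.join "" (y :: ys) = y ++ PySem.Str.join "" ys := by
  rw [← String.toList_inj]
  cases ys with
  | nil => simp [PySem.Str.toList_join, PySem.Chars.join_singleton, PySem.Chars.join_nil]
  | cons z zs => simp [PySem.Str.toList_join, PySem.Chars.join_cons_cons]

theorem pvFoldl_str {α : Type} (f : α → String) :
    ∀ (l : List α) (a : String),
      l.foldl (fun s x => s ++ f x) a = a ++ PySem.Str.join "" (l.map f) := by
  intro l
  induction l with
  | nil => intro a; simp [pvJoin_nil]
  | cons x xs ih =>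
      intro a
      simp only [List.foldl_cons, List.map_cons, ih, pvJoin_cons, String.append_assoc]

theorem pvStep_length (n : Int) (g : List (List String)) (e : List Int) :
    (bbStep n g e).length = g.length := by
  rcases e with _ | ⟨x, e⟩
  · simp [bbStep]
  rcases e with _ | ⟨y, e⟩
  · simp [bbStep]
  rcases e with _ | ⟨z, e⟩
  · simp only [bbStep]; split_ifs <;> simp
  · simp [bbStep]

theorem pvStep_rowlen (n : Int) (g : List (List String)) (e : List Int) (i : Nat) :
    ((bbStep n g e)[i]?.getD []).length = (g[i]?.getD []).length := by
  rcases e with _ | ⟨x, e⟩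
  · simp [bbStep]
  rcases e with _ | ⟨y, e⟩
  · simp [bbStep]
  rcases e with _ | ⟨z, e⟩
  · simp only [bbStep]
    split_ifs with hb
    · simp only [List.getElem?_modify]
      cases h : g[i]? with
      | none => rfl
      | some row =>
          simp only [Option.getD_some]
          split_ifs <;> simp
    · rfl
  · simp [bbStep]

theorem pvStep_cell (n : Int) (g : List (List String)) (e : List Int)
    (i j : Nat) (hi : i < n.toNat) (hj : j < n.toNat)
    (hg : g.length = n.toNat) (hrow : ((g[i]?.getD []).length = n.toNat)) :
    pvCell (bbStep n g e) i j =
      if e = [(i : Int), (j : Int)] then "|♔|" else pvCell g i j := by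
  rcases e with _ | ⟨x, e⟩
  · simp [bbStep, pvCell]
  rcases e with _ | ⟨y, e⟩
  · simp [bbStep, pvCell]
  rcases e with _ | ⟨z, e⟩
  case cons.cons.nil =>
    obtain ⟨row, hgi, hrl⟩ : ∃ row, g[i]? = some row ∧ row.length = n.toNat := by
      cases hh : g[i]? with
      | none => rw [List.getElem?_eq_none_iff] at hh; omega
      | some r => exact ⟨r, rfl, by simpa [hh] using hrow⟩
    have hcg : pvCell g i j = row[j]?.getD "" := by
      unfold pvCell; rw [hgi]; rfl
    by_cases hb : 0 ≤ x ∧ x < n ∧ 0 ≤ y ∧ y < n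
    · have hstep : bbStep n g [x, y]
          = g.modify x.toNat (fun r => r.set y.toNat "|♔|") := by
        simp [bbStep, hb]
      by_cases he : ([x, y] : List Int) = [(i : Int), (j : Int)]
      · have h1 : x.toNat = i := by
          injection he with h1 h2; omega
        have h2 : y.toNat = j := by
          injection he with h1 h2; injection h2 with h2 _; omega
        unfold pvCell
        rw [hstep, if_pos he]
        simp only [List.getElem?_modify, hgi, h1, Option.map_eq_map,
          Option.map_some, if_true, Option.getD_some]
        rw [h2, List.getElem?_set, if_pos rfl, if_pos (by omega)]
        rfl
      · unfold pvCell
        rw [hstep, if_neg he]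
        simp only [List.getElem?_modify, hgi, Option.map_eq_map, Option.map_some,
          Option.getD_some]
        by_cases hxi : x.toNat = i
        · have hyj : ¬ y.toNat = j := by
            intro h
            apply he
            simp only [List.cons.injEq, and_true]
            constructor <;> omega
          rw [if_pos hxi, List.getElem?_set, if_neg hyj]
        · rw [if_neg hxi]
    · have he : ¬ ([x, y] : List Int) = [(i : Int), (j : Int)] := by
        intro h
        injection h with h1 h2
        injection h2 with h2 _
        subst h1; subst h2
        exact hb ⟨by omega, by omega, by omega, by omega⟩
      simp [bbStep, hb, he]
  case cons.cons.cons =>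
    simp [bbStep, pvCell]

theorem pvFold_length (n : Int) :
    ∀ (arr : List (List Int)) (g : List (List String)),
      (arr.foldl (bbStep n) g).length = g.length := by
  intro arr
  induction arr with
  | nil => intro g; rfl
  | cons e rest ih => intro g; simp only [List.foldl_cons, ih, pvStep_length]

theorem pvFold_rowlen (n : Int) :
    ∀ (arr : List (List Int)) (g : List (List String)) (i : Nat),
      ((arr.foldl (bbStep n) g)[i]?.getD []).length = (g[i]?.getD []).length := by
  intro arr
  induction arr with
  | nil => intro g i; rfl
  | cons e rest ih => intro g i; simp only [List.foldl_cons, ih, pvStep_rowlen]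

theorem pvFold_cell (n : Int) :
    ∀ (arr : List (List Int)) (g : List (List String)) (i j : Nat),
      i < n.toNat → j < n.toNat → g.length = n.toNat →
      ((g[i]?.getD []).length = n.toNat) →
      pvCell (arr.foldl (bbStep n) g) i j =
        if [(i : Int), (j : Int)] ∈ arr then "|♔|" else pvCell g i j := by
  intro arr
  induction arr with
  | nil => intro g i j _ _ _ _; simp [List.foldl_nil]
  | cons e rest ih =>
      intro g i j hi hj hg hrow
      have h1 : (bbStep n g e).length = n.toNat := by rw [pvStep_length]; exact hg
      have h2 : (((bbStep n g e))[i]?.getD []).length = n.toNat := by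
        rw [pvStep_rowlen]; exact hrow
      simp only [List.foldl_cons]
      rw [ih (bbStep n g e) i j hi hj h1 h2, pvStep_cell n g e i j hi hj hg hrow]
      by_cases he : e = [(i : Int), (j : Int)]
      · simp [he, List.mem_cons]
      · have hne : ¬ ([(i : Int), (j : Int)] = e) := fun h => he h.symm
        simp [List.mem_cons, he, hne]

theorem pvRange_eq (n : Int) :
    PySem.List.pyRange 0 n 1 = (List.range n.toNat).map (fun k : Nat => (k : Int)) := by
  by_cases h : 0 ≤ n
  · have hnn : n = (n.toNat : Int) := by omega
    conv_lhs => rw [hnn, PySem.List.pyRange_zero_natCast]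
  · have h1 : PySem.List.pyRange 0 n 1 = [] := PySem.List.pyRange_one_eq_nil (by omega)
    have h2 : n.toNat = 0 := by omega
    simp [h1, h2]

-- ===== VERDICT (by name: the statement is the Claim_ definition above) =====
theorem build_board_spec : Claim_equal_build_board := by
  intro arr n _
  unfold Spec_build_board build_board build_board_alt
  set N := n.toNat with hN
  set Q : String := "|♔|"
  set B : String := "|_|"
  set blank := List.replicate N (List.replicate N B) with hblank
  set grid := arr.foldl (bbStep n) blank with hgrid
  have hglen : grid.length = N := by
    rw [hgrid, pvFold_length, hblank, List.length_replicate]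
  have hrowlen : ∀ i : Nat, i < N → (grid[i]?.getD []).length = N := by
    intro i hi
    rw [hgrid, pvFold_rowlen, hblank, List.getElem?_replicate, if_pos hi]
    simp
  have hblankcell : ∀ i j : Nat, i < N → j < N → pvCell blank i j = B := by
    intro i j hi hj
    unfold pvCell
    rw [hblank, List.getElem?_replicate, if_pos hi]
    simp [hj]
  have hcell : ∀ i j : Nat, i < N → j < N →
      pvCell grid i j = if [(i : Int), (j : Int)] ∈ arr then Q else B := by
    intro i j hi hj
    rw [hgrid, pvFold_cell n arr blank i j hi hj
          (by rw [hblank, List.length_replicate]; try exact hN)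
          (by rw [hblank, List.getElem?_replicate, if_pos hi]
              simp only [Option.getD_some, List.length_replicate]
              exact hN),
        hblankcell i j hi hj]
  -- rows of the grid, explicitly
  have hroweq : ∀ i : Nat, i < N →
      grid[i]?.getD [] = (List.range N).map
        (fun j : Nat => if [(i : Int), (j : Int)] ∈ arr then Q else B) := by
    intro i hi
    apply List.ext_getElem?
    intro j
    by_cases hj : j < N
    · have hjr : (grid[i]?.getD [])[j]? = some ((grid[i]?.getD [])[j]?.getD "") := by
        have : j < (grid[i]?.getD []).length := by rw [hrowlen i hi]; exact hj
        cases hh : (grid[i]?.getD [])[j]? with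
        | none => rw [List.getElem?_eq_none_iff] at hh; omega
        | some s => rfl
      rw [hjr]
      have hc := hcell i j hi hj
      unfold pvCell at hc
      rw [hc, List.getElem?_map, List.getElem?_range hj, Option.map_some]
    · have h1 : (grid[i]?.getD [])[j]? = none := by
        rw [List.getElem?_eq_none_iff, hrowlen i hi]; omega
      have h2 : (((List.range N).map
          (fun j : Nat => if [(i : Int), (j : Int)] ∈ arr then Q else B)))[j]? = none := by
        rw [List.getElem?_eq_none_iff]; simp; omega
      rw [h1, h2]
  -- A's outer loop is a map over range(n)
  have hA : (PySem.List.pyRange 0 n 1).foldl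
      (fun board i =>
        board ++ [ (PySem.List.pyRange 0 n 1).foldl
            (fun row j => row ++ (if [i, j] ∈ arr then Q else B)) "" ]) []
      = (PySem.List.pyRange 0 n 1).map (fun k =>
          (PySem.List.pyRange 0 n 1).foldl
            (fun row j => row ++ (if [k, j] ∈ arr then Q else B)) "") := by
    rw [PySem.List.foldl_append_singleton_eq_map, List.nil_append]
  rw [hA]
  apply List.ext_getElem
  · rw [List.length_map, List.length_map, PySem.List.length_pyRange_one, hglen]
    omega
  · intro i h1 h2
    have hlen1 : i < (PySem.List.pyRange 0 n 1).length := by simpa using h1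
    have hi : i < N := by
      rw [PySem.List.length_pyRange_one] at hlen1; omega
    rw [List.getElem_map, List.getElem_map, PySem.List.getElem_pyRange_one 0 n i hlen1]
    have hgi : grid[i] = grid[i]?.getD [] := by
      rw [List.getElem?_eq_getElem (by omega)]; rfl
    rw [hgi, hroweq i hi,
        pvFoldl_str (fun j => if [(0 : Int) + (i : Int), j] ∈ arr then Q else B)
          (PySem.List.pyRange 0 n 1) "",
        pvRange_eq, List.map_map]
    have hfun : ((fun j => if [(0 : Int) + (i : Int), j] ∈ arr then Q else B) ∘
        (fun k : Nat => (k : Int))) =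
        (fun j : Nat => if [(i : Int), (j : Int)] ∈ arr then Q else B) := by
      funext k
      simp [Function.comp]
    rw [hfun]
    simp
    try rfl
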